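-- pv_equiv track=rewrite | github.com/machine-learning-is-easy/coding-for-interview | questions/2000+/3356. Zero Array Transformation II.py | can_form_zero_array
-- ===== SOURCE A (Python) =====
-- from typing import List
--
-- def can_form_zero_array(
--     nums: List[int], queries: List[List[int]], k: int
-- ) -> bool:
--     n = len(nums)
--     total_sum = 0
--     difference_array = [0] * (n + 1)
--
--     # Process query
--     for query_index in range(k):
--         start, end, val = queries[query_index]
--
--         # Process start and end of range
--         difference_array[start] += val
--         difference_array[end + 1] -= val
--
--     # Check if zero array can be formed
--     for num_index in range(n):
--         total_sum += difference_array[num_index]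
--         if total_sum < nums[num_index]:
--             return False
--     return True
--
-- nums = [2,0,2]
--
-- queries = [[0,2,1],[0,2,1],[1,1,3]]
-- ===== SOURCE B (Python) =====
-- def can_form_zero_array(nums, queries, k):
--     active = queries[:max(k, 0)]
--     for i, x in enumerate(nums):
--         if sum(v for s, e, v in active if s <= i <= e) < x:
--             return False
--     return True
-- ===== Notes on version B (the rewrite author's own statement) =====
-- stated objective: alternative
-- what changed: B drops the difference array and the prefix-sum pass entirely: for each index i it directly sums val over the first k queries whose inclusive range [start, end] contains i, returning False at the first under-covered index.
-- outside the precondition, e.g. on can_form_zero_array([1], [[-1, 0, 5]], 1): A returns False, B returns True; on can_form_zero_array([0, -3, 0], [[2, 0, 4]], 1): A returns False, B returns True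
import Mathlib
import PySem

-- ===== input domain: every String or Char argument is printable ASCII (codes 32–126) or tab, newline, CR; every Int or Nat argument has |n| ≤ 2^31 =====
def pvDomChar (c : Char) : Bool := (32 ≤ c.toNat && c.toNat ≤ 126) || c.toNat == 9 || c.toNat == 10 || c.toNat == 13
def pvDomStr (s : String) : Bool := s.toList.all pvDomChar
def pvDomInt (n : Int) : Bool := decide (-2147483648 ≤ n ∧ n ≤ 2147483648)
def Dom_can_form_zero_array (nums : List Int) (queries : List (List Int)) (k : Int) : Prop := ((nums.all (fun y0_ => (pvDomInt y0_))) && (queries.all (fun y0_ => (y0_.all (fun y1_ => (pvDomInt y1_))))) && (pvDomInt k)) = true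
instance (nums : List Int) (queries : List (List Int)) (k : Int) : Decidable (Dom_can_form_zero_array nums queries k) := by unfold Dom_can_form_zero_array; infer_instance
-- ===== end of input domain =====

-- B replaces A's difference-array + prefix-sum pass by a direct per-index scan of the
-- first k queries (objective: alternative decomposition, not faster).

-- ===== PORT A =====
-- difference_array[idx] += v  (Python negative index counts from the end; out of range = IndexError, excluded by Pre_)
def pvAddAt (xs : List Int) (idx v : Int) : List Int :=
  match PySem.List.pyGet? xs idx with
  | some x => xs.set (if idx < 0 then idx + (xs.length : Int) else idx).toNat (x + v)
  | none => xs

-- start, end, val = q; difference_array[start] += val; difference_array[end+1] -= val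
def pvApplyQuery (diff : List Int) (q : List Int) : List Int :=
  match q with
  | [s, e, v] => pvAddAt (pvAddAt diff s v) (e + 1) (-v)
  | _ => diff

-- the second loop of A: running prefix sum with early False
def pvLoopA (nums diff : List Int) : List Int → Int → Bool
  | [], _ => true
  | i :: rest, total =>
      let t := total + PySem.List.pyGetD diff i 0
      if t < PySem.List.pyGetD nums i 0 then false else pvLoopA nums diff rest t

def can_form_zero_array (nums : List Int) (queries : List (List Int)) (k : Int) : Bool :=
  let n := nums.length
  let diff := (PySem.List.pyRange 0 k 1).foldl
      (fun d j => pvApplyQuery d (PySem.List.pyGetD queries j [])) (List.replicate (n + 1) 0)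
  pvLoopA nums diff (PySem.List.pyRange 0 (n : Int) 1) 0

-- ===== PORT B =====
-- sum(v for s, e, v in active if s <= i <= e)
def pvCov (active : List (List Int)) (i : Int) : Int :=
  active.foldl
    (fun acc q =>
      match q with
      | [s, e, v] => if s ≤ i ∧ i ≤ e then acc + v else acc
      | _ => acc) 0

-- for i, x in enumerate(nums): if cov < x: return False
def pvLoopB (active : List (List Int)) : List Int → Int → Bool
  | [], _ => true
  | x :: rest, i => if pvCov active i < x then false else pvLoopB active rest (i + 1)

def can_form_zero_array_alt (nums : List Int) (queries : List (List Int)) (k : Int) : Bool :=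
  pvLoopB (PySem.List.slice queries none (some (max k 0))) nums 0

-- ===== PRECONDITION & SPEC =====
-- Pre_ restricts to the function's natural domain: the first k queries must exist, be triples,
-- and be well-formed inclusive ranges 0 <= start <= end <= n-1 (the problem's own constraint).
-- Besides A's genuine raises (IndexError/ValueError) this also excludes inputs A returns on:
-- rows with a negative start/end or start > end, where A's difference-array updates hit
-- Python-negative-index positions and no behaviour is specified (cites in claim.json).
def Pre_can_form_zero_array (nums : List Int) (queries : List (List Int)) (k : Int) : Prop :=
  k.toNat ≤ queries.length ∧
  ∀ q ∈ queries.take k.toNat,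
    q.length = 3 ∧ 0 ≤ q.getD 0 0 ∧ q.getD 0 0 ≤ q.getD 1 0 ∧ q.getD 1 0 + 1 ≤ (nums.length : Int)
instance (nums : List Int) (queries : List (List Int)) (k : Int) : Decidable (Pre_can_form_zero_array nums queries k) := by unfold Pre_can_form_zero_array; infer_instance

def pvWitness_can_form_zero_array : List Int × List (List Int) × Int :=
  ([2, 0, 2], [[0, 2, 1], [0, 2, 1], [1, 1, 3]], 3)

def Spec_can_form_zero_array (nums : List Int) (queries : List (List Int)) (k : Int) (out : Bool) : Prop := out = can_form_zero_array_alt nums queries k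
instance (nums : List Int) (queries : List (List Int)) (k : Int) (out : Bool) : Decidable (Spec_can_form_zero_array nums queries k out) := by unfold Spec_can_form_zero_array; infer_instance

-- ===== CLAIM (what is proved, stated in full; the proofs are below) =====
def Claim_equal_can_form_zero_array : Prop := ∀ (nums : List Int) (queries : List (List Int)) (k : Int), Dom_can_form_zero_array nums queries k → Pre_can_form_zero_array nums queries k → Spec_can_form_zero_array nums queries k (can_form_zero_array nums queries k)

-- ===== LEMMAS AND PROOFS =====

-- a query admitted by Pre_: a triple with a well-formed range inside [0, n-1]
def pvWf (n : Nat) (q : List Int) : Prop :=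
  ∃ s e v, q = [s, e, v] ∧ 0 ≤ s ∧ s ≤ e ∧ e + 1 ≤ (n : Int)

-- contribution of one processed query to the prefix sum diff[0..m-1]
def pvQContrib (q : List Int) (m : Nat) : Int :=
  match q with
  | [s, e, v] => (if s < (m : Int) then v else 0) + (if e + 1 < (m : Int) then -v else 0)
  | _ => 0

-- the per-index contribution B's generator sums
def pvCContrib (i : Int) (q : List Int) : Int :=
  match q with
  | [s, e, v] => if s ≤ i ∧ i ≤ e then v else 0
  | _ => 0

lemma takeSum_set (xs : List Int) (j m : Nat) (v : Int) (h : j < xs.length) :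
    ((xs.set j (xs.getD j 0 + v)).take m).sum = (xs.take m).sum + (if j < m then v else 0) := by
  induction xs generalizing j m with
  | nil => simp at h
  | cons x xs ih =>
    cases j with
    | zero =>
      cases m with
      | zero => simp
      | succ m => simp [List.getD]; ring
    | succ j =>
      cases m with
      | zero => simp
      | succ m =>
        have := ih j m (by simpa using h)
        simp only [List.set, List.take, List.sum_cons, List.getD_cons_succ, this,
          Nat.succ_lt_succ_iff]
        ring

lemma length_pvAddAt (xs : List Int) (idx v : Int) : (pvAddAt xs idx v).length = xs.length := by
  unfold pvAddAt
  cases h : PySem.List.pyGet? xs idx <;> simp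

lemma pvAddAt_eq_set (xs : List Int) (idx v : Int) (h0 : 0 ≤ idx) (h1 : idx < (xs.length : Int)) :
    pvAddAt xs idx v = xs.set idx.toNat (xs.getD idx.toNat 0 + v) := by
  unfold pvAddAt
  rw [PySem.List.pyGet?_eq_some_getElem xs h0 h1]
  have hneg : ¬ idx < 0 := by omega
  simp only [hneg, if_false]
  congr 1
  rw [List.getD_eq_getElem _ _ (by omega)]

lemma takeSum_pvAddAt (xs : List Int) (idx v : Int) (m : Nat)
    (h0 : 0 ≤ idx) (h1 : idx < (xs.length : Int)) :
    ((pvAddAt xs idx v).take m).sum = (xs.take m).sum + (if idx < (m : Int) then v else 0) := by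
  rw [pvAddAt_eq_set xs idx v h0 h1,
    takeSum_set xs idx.toNat m v (by omega)]
  congr 1
  split_ifs <;> omega

lemma length_pvApplyQuery (diff q : List Int) : (pvApplyQuery diff q).length = diff.length := by
  rcases q with _ | ⟨s, _ | ⟨e, _ | ⟨v, _ | ⟨w, r⟩⟩⟩⟩ <;>
    simp [pvApplyQuery, length_pvAddAt]

lemma takeSum_pvApplyQuery (diff q : List Int) (n m : Nat)
    (hlen : diff.length = n + 1) (h : pvWf n q) :
    ((pvApplyQuery diff q).take m).sum = (diff.take m).sum + pvQContrib q m := by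
  obtain ⟨s, e, v, rfl, hs, hse, hen⟩ := h
  have hs1 : s < (diff.length : Int) := by omega
  have he0 : 0 ≤ e + 1 := by omega
  have he1 : e + 1 < ((pvAddAt diff s v).length : Int) := by
    rw [length_pvAddAt]; omega
  simp only [pvApplyQuery, pvQContrib]
  rw [takeSum_pvAddAt _ _ _ m he0 he1, takeSum_pvAddAt _ _ _ m hs hs1]
  ring

lemma length_foldl_apply (qs : List (List Int)) (diff : List Int) :
    (qs.foldl pvApplyQuery diff).length = diff.length := by
  induction qs generalizing diff with
  | nil => rfl
  | cons q qs ih => simp [List.foldl_cons, ih, length_pvApplyQuery]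

lemma takeSum_foldl (qs : List (List Int)) (diff : List Int) (n m : Nat)
    (hlen : diff.length = n + 1) (hwf : ∀ q ∈ qs, pvWf n q) :
    ((qs.foldl pvApplyQuery diff).take m).sum
      = (diff.take m).sum + (qs.map (pvQContrib · m)).sum := by
  induction qs generalizing diff with
  | nil => simp
  | cons q qs ih =>
    have hlen' : (pvApplyQuery diff q).length = n + 1 := by
      rw [length_pvApplyQuery]; exact hlen
    rw [List.foldl_cons, ih _ hlen' (fun q hq => hwf q (List.mem_cons_of_mem _ hq)),
      takeSum_pvApplyQuery diff q n m hlen (hwf q List.mem_cons_self)]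
    simp
    ring

lemma pvQContrib_eq (q : List Int) (n : Nat) (h : pvWf n q) (j : Nat) :
    pvQContrib q (j + 1) = pvCContrib (j : Int) q := by
  obtain ⟨s, e, v, rfl, hs, hse, hen⟩ := h
  simp only [pvQContrib, pvCContrib]
  have e1 : (if s < ((j + 1 : Nat) : Int) then v else 0) = if s ≤ (j : Int) then v else 0 := by
    split_ifs <;> first | rfl | omega
  have e2 : (if e + 1 < ((j + 1 : Nat) : Int) then -v else 0)
      = if (j : Int) ≤ e then 0 else -v := by
    split_ifs <;> first | rfl | omega
  rw [e1, e2]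
  split_ifs <;> omega

lemma pvCov_foldl (active : List (List Int)) (i acc : Int) :
    active.foldl
      (fun acc q =>
        match q with
        | [s, e, v] => if s ≤ i ∧ i ≤ e then acc + v else acc
        | _ => acc) acc
      = acc + (active.map (pvCContrib i)).sum := by
  induction active generalizing acc with
  | nil => simp
  | cons q qs ih =>
    rcases q with _ | ⟨s, _ | ⟨e, _ | ⟨v, _ | ⟨w, r⟩⟩⟩⟩ <;>
      simp only [List.foldl_cons, List.map_cons, List.sum_cons, ih, pvCContrib] <;>
      (try split_ifs) <;> ring

lemma pvCov_eq_sum (active : List (List Int)) (i : Int) :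
    pvCov active i = (active.map (pvCContrib i)).sum := by
  unfold pvCov
  rw [pvCov_foldl]
  ring

-- the central invariant: after processing well-formed queries, every prefix sum of the
-- difference array is the per-index coverage B computes
lemma prefix_eq_cov (qs : List (List Int)) (n : Nat) (hwf : ∀ q ∈ qs, pvWf n q) (j : Nat) :
    ((qs.foldl pvApplyQuery (List.replicate (n + 1) 0)).take (j + 1)).sum
      = pvCov qs (j : Int) := by
  rw [takeSum_foldl qs _ n (j + 1) (by simp) hwf, pvCov_eq_sum]
  have h0 : ((List.replicate (n + 1) (0 : Int)).take (j + 1)).sum = 0 := by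
    rw [List.take_replicate]; simp
  rw [h0, zero_add]
  exact congrArg List.sum (List.map_congr_left (fun q hq => pvQContrib_eq q n (hwf q hq) j))

lemma loops_eq (active : List (List Int)) (diff : List Int)
    (hcov : ∀ j : Nat, (diff.take (j + 1)).sum = pvCov active (j : Int)) :
    ∀ (rest pre : List Int), diff.length = (pre ++ rest).length + 1 →
      pvLoopA (pre ++ rest) diff
          (PySem.List.pyRange (pre.length : Int) (((pre ++ rest).length : Int)) 1)
          ((diff.take pre.length).sum)
        = pvLoopB active rest (pre.length : Int) := by
  intro rest
  induction rest with
  | nil =>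
    intro pre _
    rw [PySem.List.pyRange_one_eq_nil (by simp)]
    rfl
  | cons x rest ih =>
    intro pre hlen
    have hlt : (pre.length : Int) < ((pre ++ x :: rest).length : Int) := by
      simp only [List.length_append, List.length_cons]
      push_cast
      omega
    rw [PySem.List.pyRange_one_cons hlt]
    have hja : pre.length < diff.length := by
      simp only [List.length_append, List.length_cons] at hlen
      omega
    have ht : (diff.take pre.length).sum + diff.getD pre.length 0
        = pvCov active (pre.length : Int) := by
      rw [← hcov pre.length, List.sum_take_succ diff pre.length hja,
        List.getD_eq_getElem _ _ hja]
    have hx : PySem.List.pyGetD (pre ++ x :: rest) (pre.length : Int) 0 = x := by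
      rw [PySem.List.pyGetD_natCast]
      rw [List.getD_eq_getElem _ _ (by simp)]
      simp
    show (if (diff.take pre.length).sum + PySem.List.pyGetD diff (pre.length : Int) 0
            < PySem.List.pyGetD (pre ++ x :: rest) (pre.length : Int) 0 then false
          else pvLoopA (pre ++ x :: rest) diff _ _)
        = pvLoopB active (x :: rest) (pre.length : Int)
    rw [PySem.List.pyGetD_natCast diff pre.length 0, hx, ht]
    show _ = if pvCov active (pre.length : Int) < x then false else pvLoopB active rest _
    by_cases hc : pvCov active (pre.length : Int) < x
    · simp [hc]
    · simp only [hc, if_false]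
      have heq : pre ++ x :: rest = (pre ++ [x]) ++ rest := by simp
      have hih := ih (pre ++ [x]) (by rw [← heq]; exact hlen)
      rw [heq]
      have hlp : ((pre ++ [x]).length : Int) = (pre.length : Int) + 1 := by simp
      have hts : (diff.take (pre ++ [x]).length).sum = pvCov active (pre.length : Int) := by
        simp only [List.length_append, List.length_singleton]
        rw [List.sum_take_succ diff pre.length hja, ← List.getD_eq_getElem _ _ hja]
        exact ht
      rw [hlp, hts] at hih
      exact hih

-- the first loop of A only touches the first k.toNat queries
lemma foldA_eq_take (queries : List (List Int)) (k : Int) (init : List Int)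
    (hk : k.toNat ≤ queries.length) :
    (PySem.List.pyRange 0 k 1).foldl
        (fun d j => pvApplyQuery d (PySem.List.pyGetD queries j [])) init
      = (queries.take k.toNat).foldl pvApplyQuery init := by
  by_cases hk0 : k ≤ 0
  · rw [PySem.List.pyRange_one_eq_nil hk0]
    have : k.toNat = 0 := by omega
    simp [this]
  · have hlen : ((queries.take k.toNat).length : Int) = k := by
      rw [List.length_take]; omega
    rw [PySem.List.foldl_congr_mem (PySem.List.pyRange 0 k 1)
        (fun d j => pvApplyQuery d (PySem.List.pyGetD queries j []))
        (fun d j => pvApplyQuery d (PySem.List.pyGetD (queries.take k.toNat) j [])) init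
        (by
          intro acc j hj
          have hb := (PySem.List.mem_pyRange_one).1 hj
          dsimp only
          congr 1
          rw [PySem.List.pyGetD_of_nonneg queries [] hb.1,
            PySem.List.pyGetD_of_nonneg (queries.take k.toNat) [] hb.1]
          rw [List.getD_eq_getElem?_getD, List.getD_eq_getElem?_getD, List.getElem?_take]
          split_ifs with h
          · rfl
          · omega)]
    have h := PySem.List.foldl_pyRange_zero_pyGetD' (queries.take k.toNat) [] pvApplyQuery init
    rw [hlen] at h
    exact h

lemma pre_wf (nums : List Int) (queries : List (List Int)) (k : Int)
    (hpre : Pre_can_form_zero_array nums queries k) :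
    ∀ q ∈ queries.take k.toNat, pvWf nums.length q := by
  intro q hq
  obtain ⟨h3, hs, hse, hen⟩ := hpre.2 q hq
  rcases q with _ | ⟨s, _ | ⟨e, _ | ⟨v, _ | ⟨w, r⟩⟩⟩⟩ <;> simp at h3
  exact ⟨s, e, v, rfl, by simpa using hs, by simpa using hse, by simpa using hen⟩

-- ===== VERDICT (by name: the statement is the Claim_ definition above) =====
theorem can_form_zero_array_spec : Claim_equal_can_form_zero_array := by
  intro nums queries k _ hpre
  have hwf := pre_wf nums queries k hpre
  have hcov : ∀ j : Nat,
      (((queries.take k.toNat).foldl pvApplyQuery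
          (List.replicate (nums.length + 1) 0)).take (j + 1)).sum
        = pvCov (queries.take k.toNat) (j : Int) :=
    fun j => prefix_eq_cov _ nums.length hwf j
  have hlen : ((queries.take k.toNat).foldl pvApplyQuery
      (List.replicate (nums.length + 1) 0)).length = (([] : List Int) ++ nums).length + 1 := by
    rw [length_foldl_apply]; simp
  have hmain := loops_eq (queries.take k.toNat) _ hcov nums [] hlen
  show can_form_zero_array nums queries k = can_form_zero_array_alt nums queries k
  show pvLoopA nums
      ((PySem.List.pyRange 0 k 1).foldl
        (fun d j => pvApplyQuery d (PySem.List.pyGetD queries j []))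
        (List.replicate (nums.length + 1) 0))
      (PySem.List.pyRange 0 (nums.length : Int) 1) 0
    = pvLoopB (PySem.List.slice queries none (some (max k 0))) nums 0
  rw [foldA_eq_take queries k _ hpre.1]
  have hsl : PySem.List.slice queries none (some (max k 0)) = queries.take k.toNat := by
    rw [show max k 0 = ((k.toNat : Nat) : Int) from by omega,
      PySem.List.slice_to queries (by omega)]
    simp
    omega
  rw [hsl]
  simpa using hmain
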